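-- pv_equiv track=rewrite | github.com/spacearya/KingstonAssist | backend/router.py | split_food_entries
-- ===== SOURCE A (Python) =====
-- from typing import Dict, List, Tuple, Optional
--
-- def split_food_entries(content: str) -> List[str]:
--     """Split food file content into individual entries"""
--     # Entries are separated by double newlines or "Business Name:" markers
--     entries = []
--     current_entry = []
--     lines = content.split('\n')
--
--     for line in lines:
--         if line.startswith("Business Name:") and current_entry:
--             # Save previous entry
--             entries.append('\n'.join(current_entry))
--             current_entry = [line]
--         else:
--             current_entry.append(line)
--
--     if current_entry:
--         entries.append('\n'.join(current_entry))
--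
--     return [e.strip() for e in entries if e.strip() and not e.startswith("KINGSTON") and not e.startswith("===")]
-- ===== SOURCE B (Python) =====
-- def split_food_entries(content: str) -> list:
--     """Split food file content into individual entries"""
--     # Build groups back-to-front: scan the lines in reverse, prepending each
--     # line to the front group and opening a new group above every marker line.
--     groups = [[]]
--     for line in reversed(content.split('\n')):
--         groups[0].insert(0, line)
--         if line.startswith("Business Name:"):
--             groups.insert(0, [])
--     if not groups[0]:
--         groups.pop(0)
--     entries = ['\n'.join(g) for g in groups]
--     return [e.strip() for e in entries if e.strip() and not e.startswith("KINGSTON") and not e.startswith("===")]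
-- ===== Notes on version B (the rewrite author's own statement) =====
-- stated objective: alternative
-- what changed: Replaces the forward accumulator loop with its current_entry-nonempty guard by a reverse traversal that builds the group list back-to-front (prepend to the front group, open a new group above every 'Business Name:' line, drop a leading empty group once at the end).
import Mathlib
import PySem

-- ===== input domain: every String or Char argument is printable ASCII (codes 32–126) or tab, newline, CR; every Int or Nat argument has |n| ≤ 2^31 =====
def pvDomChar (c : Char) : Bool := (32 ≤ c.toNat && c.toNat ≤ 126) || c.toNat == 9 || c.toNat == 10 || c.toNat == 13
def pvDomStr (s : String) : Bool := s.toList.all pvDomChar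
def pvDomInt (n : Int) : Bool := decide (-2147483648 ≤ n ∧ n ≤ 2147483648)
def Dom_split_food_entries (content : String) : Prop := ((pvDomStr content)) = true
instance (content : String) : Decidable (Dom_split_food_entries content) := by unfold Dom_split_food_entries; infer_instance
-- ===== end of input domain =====

-- B replaces A's forward accumulator loop (with its "current_entry nonempty" guard)
-- by a reverse traversal building the group list back-to-front; objective: alternative (same cost).


-- line.startswith("Business Name:")
def sfeIsMark (line : String) : Bool := PySem.Str.startswith line "Business Name:"

-- shared final comprehension: [e.strip() for e in entries if e.strip() and not e.startswith("KINGSTON") and not e.startswith("===")]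
def sfePost (entries : List String) : List String :=
  (entries.filter (fun e =>
      PySem.Str.strip e ≠ "" && !PySem.Str.startswith e "KINGSTON" && !PySem.Str.startswith e "===")).map
    PySem.Str.strip

-- ===== PORT A =====
-- loop body of A: state = (entries, current_entry)
def sfeStepA (st : List String × List String) (line : String) : List String × List String :=
  if sfeIsMark line && !st.2.isEmpty then
    (st.1 ++ [PySem.Str.join "\n" st.2], [line])
  else
    (st.1, st.2 ++ [line])

def split_food_entries (content : String) : List String :=
  -- content.split('\n'): sep is the non-empty literal "\n", so split? is always some
  let lines := (PySem.Str.split? content "\n").getD []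
  let st := lines.foldl sfeStepA ([], [])
  let entries := if !st.2.isEmpty then st.1 ++ [PySem.Str.join "\n" st.2] else st.1
  sfePost entries

-- ===== PORT B =====
-- loop body of B (lines scanned in reverse): state = (finished groups, current group), both reversed
def sfeStepB (st : List (List String) × List String) (line : String) :
    List (List String) × List String :=
  let cur2 := st.2 ++ [line]
  if sfeIsMark line then (st.1 ++ [cur2], []) else (st.1, cur2)

def split_food_entries_alt (content : String) : List String :=
  let lines := (PySem.Str.split? content "\n").getD []
  let st := lines.reverse.foldl sfeStepB ([], [])
  let groups := (if st.2 ≠ [] then [st.2] else []) ++ st.1.reverse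
  let entries := groups.map (fun g => PySem.Str.join "\n" g.reverse)
  sfePost entries

-- ===== PRECONDITION & SPEC =====
def Spec_split_food_entries (content : String) (out : List String) : Prop := out = split_food_entries_alt content
instance (content : String) (out : List String) : Decidable (Spec_split_food_entries content out) := by unfold Spec_split_food_entries; infer_instance

-- ===== CLAIM (what is proved, stated in full; the proofs are below) =====
def Claim_equal_split_food_entries : Prop := ∀ (content : String), Dom_split_food_entries content → Spec_split_food_entries content (split_food_entries content)

-- ===== LEMMAS AND PROOFS =====

-- the grouping both loops compute: chunk the lines at "Business Name:" markers
def sfeChunks (c : List String) : List String → List (List String)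
  | [] => [c]
  | l :: ls =>
    if sfeIsMark l then c :: sfeChunks [l] ls
    else sfeChunks (c ++ [l]) ls

theorem sfe_A_loop (ls : List String) : ∀ (e c : List String), c ≠ [] →
    (let st := ls.foldl sfeStepA (e, c)
     if !st.2.isEmpty then st.1 ++ [PySem.Str.join "\n" st.2] else st.1)
      = e ++ (sfeChunks c ls).map (PySem.Str.join "\n") := by
  induction ls with
  | nil => intro e c hc; simp [sfeChunks, hc]
  | cons l ls ih =>
    intro e c hc
    obtain ⟨x, xs, rfl⟩ : ∃ x xs, c = x :: xs := by
      cases c with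
      | nil => exact absurd rfl hc
      | cons x xs => exact ⟨x, xs, rfl⟩
    simp only [List.foldl_cons, sfeStepA, List.isEmpty_cons, Bool.not_false, Bool.and_true]
    by_cases hm : sfeIsMark l = true
    · rw [if_pos hm, ih _ [l] (by simp)]
      simp [sfeChunks, hm]
    · rw [if_neg hm, ih _ ((x :: xs) ++ [l]) (by simp)]
      simp [sfeChunks, hm]

theorem sfe_B_loop (ls : List String) : ∀ (c : List String),
    sfeChunks c ls =
      (c ++ (List.foldr (fun x st => sfeStepB st x) (([], []) : List (List String) × List String) ls).2.reverse) ::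
        ((List.foldr (fun x st => sfeStepB st x) (([], []) : List (List String) × List String) ls).1.reverse.map List.reverse) := by
  induction ls with
  | nil => intro c; simp [sfeChunks]
  | cons l ls ih =>
    intro c
    rw [List.foldr_cons]
    rcases hF : (List.foldr (fun x st => sfeStepB st x)
        (([], []) : List (List String) × List String) ls) with ⟨fin, cur⟩
    by_cases hm : sfeIsMark l = true
    · rw [sfeChunks, if_pos hm, ih [l], hF]
      simp [sfeStepB, hm]
    · rw [sfeChunks, if_neg hm, ih (c ++ [l]), hF]
      simp [sfeStepB, hm]

-- ===== VERDICT (by name: the statement is the Claim_ definition above) =====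
theorem split_food_entries_spec : Claim_equal_split_food_entries := by
  intro content _
  unfold Spec_split_food_entries split_food_entries split_food_entries_alt
  dsimp only
  rw [List.foldl_reverse]
  cases hlines : (PySem.Str.split? content "\n").getD [] with
  | nil => simp [sfePost]
  | cons l0 rest =>
    -- A's first iteration: the guard is false on the empty current_entry, so state becomes ([], [l0])
    have hA0 : sfeStepA ([], []) l0 = ([], [l0]) := by
      unfold sfeStepA; simp
    simp only [List.foldl_cons, List.foldr_cons, hA0]
    rw [sfe_A_loop rest [] [l0] (by simp)]
    rcases hF : (List.foldr (fun x st => sfeStepB st x)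
        (([], []) : List (List String) × List String) rest) with ⟨fin, cur⟩
    have hB := sfe_B_loop rest [l0]
    rw [hF] at hB
    rw [hB]
    simp only [sfeStepB]
    by_cases hm : sfeIsMark l0 = true
    · rw [if_pos hm]
      simp [List.map_map, Function.comp_def]
    · rw [if_neg hm]
      simp [List.map_map, Function.comp_def]
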